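-- pv_equiv track=rewrite | github.com/JoshKarpel/euler-python | problems/004.py | palindrome_test
-- ===== SOURCE A (Python) =====
-- def palindrome_test(n):
--     reverse = ''
--     n_str = str(n)
--     for i in range(len(n_str)):
--         reverse += n_str[-(i + 1)]
--     if reverse == n_str:
--         return True
--     return False
-- ===== SOURCE B (Python) =====
-- def palindrome_test(n):
--     s = str(n)
--     for i in range(len(s) // 2):
--         if s[i] != s[-(i + 1)]:
--             return False
--     return True
-- ===== Notes on version B (the rewrite author's own statement) =====
-- stated objective: simpler
-- what changed: B drops A's reversed-string accumulator entirely and instead compares s[i] with s[-(i+1)] for i in range(len(s)//2), returning False at the first mismatch.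
import Mathlib
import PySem

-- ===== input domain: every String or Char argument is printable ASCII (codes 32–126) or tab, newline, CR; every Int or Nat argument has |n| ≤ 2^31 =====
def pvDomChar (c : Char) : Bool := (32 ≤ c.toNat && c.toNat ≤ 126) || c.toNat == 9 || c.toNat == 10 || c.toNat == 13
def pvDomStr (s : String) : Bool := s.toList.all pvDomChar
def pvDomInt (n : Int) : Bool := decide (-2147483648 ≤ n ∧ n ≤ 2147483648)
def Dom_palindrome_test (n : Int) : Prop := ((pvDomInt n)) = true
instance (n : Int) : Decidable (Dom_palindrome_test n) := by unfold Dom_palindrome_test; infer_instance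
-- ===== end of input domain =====

-- B replaces A's reversed-string accumulator with an early-exit half-scan comparing s[i] to s[-(i+1)]; simpler, O(1) extra space.


-- ===== PORT A =====
-- str(n) → PySem.Int.toChars; n_str[-(i+1)] → pyGetD (index always in range, so the default is never read)
def palindrome_test (n : Int) : Bool :=
  let nstr := PySem.Int.toChars n
  let reverse := (PySem.List.pyRange 0 (nstr.length : Int) 1).foldl
      (fun rev i => rev ++ [PySem.List.pyGetD nstr (-(i + 1)) ' ']) []
  if reverse == nstr then true else false

-- ===== PORT B =====
-- early-exit loop over range(len(s)//2): List.all short-circuits at the first mismatch, like B's `return False`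
def palindrome_test_alt (n : Int) : Bool :=
  let s := PySem.Int.toChars n
  (PySem.List.pyRange 0 (PySem.Int.floordiv (s.length : Int) 2) 1).all
    (fun i => PySem.List.pyGetD s i ' ' == PySem.List.pyGetD s (-(i + 1)) ' ')

-- ===== PRECONDITION & SPEC =====
def Spec_palindrome_test (n : Int) (out : Bool) : Prop := out = palindrome_test_alt n
instance (n : Int) (out : Bool) : Decidable (Spec_palindrome_test n out) := by unfold Spec_palindrome_test; infer_instance

-- ===== CLAIM (what is proved, stated in full; the proofs are below) =====
def Claim_equal_palindrome_test : Prop := ∀ (n : Int), Dom_palindrome_test n → Spec_palindrome_test n (palindrome_test n)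

-- ===== LEMMAS AND PROOFS =====

-- A's fold builds exactly the reversed list of characters.
lemma pal_fold_eq_reverse (cs : List Char) :
    (PySem.List.pyRange 0 (cs.length : Int) 1).foldl
      (fun rev i => rev ++ [PySem.List.pyGetD cs (-(i + 1)) ' ']) [] = cs.reverse := by
  rw [PySem.List.pyRange_zero_natCast, List.foldl_map,
      PySem.List.foldl_append_singleton_eq_map]
  apply List.ext_getElem
  · simp
  · intro i h1 h2
    simp only [List.nil_append, List.getElem_map, List.getElem_range, List.getElem_reverse]
    simp only [List.nil_append, List.length_map, List.length_range] at h1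
    have : -((i : Int) + 1) = -(((i + 1 : Nat) : Int)) := by push_cast; ring
    rw [this, PySem.List.pyGetD_neg_natCast cs (i + 1) ' ' (by omega) (by omega)]
    congr 1
    omega

-- the half-scan agrees with the full palindrome test
lemma pal_half_iff (cs : List Char) :
    (∀ k (hk : k < cs.length / 2), cs[k]'(by omega) = cs[cs.length - 1 - k]'(by omega)) ↔
      cs.reverse = cs := by
  constructor
  · intro h
    apply List.ext_getElem
    · simp
    · intro i h1 h2
      rw [List.getElem_reverse]
      rcases lt_or_ge i (cs.length / 2) with hi | hi
      · exact (h i hi).symm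
      · rcases lt_or_ge (cs.length - 1 - i) (cs.length / 2) with hj | hj
        · have := h (cs.length - 1 - i) hj
          rw [this]
          congr 1
          omega
        · congr 1
          omega
  · intro h k hk
    have h2 := List.getElem_reverse (l := cs) (i := k) (h := by simp; omega)
    simp only [h] at h2
    exact h2

theorem pal_main (n : Int) : palindrome_test n = palindrome_test_alt n := by
  unfold palindrome_test palindrome_test_alt
  set cs := PySem.Int.toChars n with hcs
  simp only [pal_fold_eq_reverse]
  have hfd : PySem.Int.floordiv (cs.length : Int) 2 = ((cs.length / 2 : Nat) : Int) := by
    exact_mod_cast PySem.Int.floordiv_natCast cs.length 2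
  rw [hfd, PySem.List.pyRange_zero_natCast, List.all_map]
  by_cases h : cs.reverse = cs
  · simp only [h, beq_self_eq_true, if_true]
    symm
    rw [List.all_eq_true]
    intro k hk
    simp only [List.mem_range] at hk
    simp only [Function.comp]
    rw [PySem.List.pyGetD_eq_getElem cs ' ' (by omega) (by exact_mod_cast (by omega : k < cs.length))]
    have : -((k : Int) + 1) = -(((k + 1 : Nat) : Int)) := by push_cast; ring
    rw [this, PySem.List.pyGetD_neg_natCast cs (k + 1) ' ' (by omega) (by omega)]
    have := (pal_half_iff cs).2 h k hk
    simp only [Int.toNat_natCast]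
    rw [this]
    simp only [beq_iff_eq]
    congr 1
    omega
  · have hne : (cs.reverse == cs) = false := by simp [h]
    rw [hne]
    simp only [Bool.false_eq_true, if_false]
    by_contra hall
    rw [eq_comm, ← Bool.not_eq_true, not_not, List.all_eq_true] at hall
    apply h
    apply (pal_half_iff cs).1
    intro k hk
    have hp := hall k (List.mem_range.2 hk)
    simp only [Function.comp] at hp
    rw [PySem.List.pyGetD_eq_getElem cs ' ' (by omega)
        (by exact_mod_cast (by omega : k < cs.length))] at hp
    have heq : -((k : Int) + 1) = -(((k + 1 : Nat) : Int)) := by push_cast; ring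
    rw [heq, PySem.List.pyGetD_neg_natCast cs (k + 1) ' ' (by omega) (by omega)] at hp
    simp only [Int.toNat_natCast, beq_iff_eq] at hp
    rw [hp]
    congr 1
    omega

-- ===== VERDICT (by name: the statement is the Claim_ definition above) =====
theorem palindrome_test_spec : Claim_equal_palindrome_test := by
  intro n _
  unfold Spec_palindrome_test
  exact pal_main n
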